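-- pv_equiv track=rewrite | github.com/LenoreWoW/Final_DT | legacy_scripts/run_ibm_quantum_hardware.py | calculate_triangle_cut
-- ===== SOURCE A (Python) =====
-- def calculate_triangle_cut(bitstring):
--     """Calculate cut value for triangle graph."""
--     if len(bitstring) < 3:
--         return 0
--
--     edges = [(0, 1), (1, 2), (2, 0)]
--     cut_value = 0
--
--     for i, j in edges:
--         if i < len(bitstring) and j < len(bitstring):
--             if bitstring[i] != bitstring[j]:
--                 cut_value += 1
--
--     return cut_value
-- ===== SOURCE B (Python) =====
-- def calculate_triangle_cut(bitstring):
--     """Calculate cut value for triangle graph (distinct-count closed form)."""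
--     if len(bitstring) < 3:
--         return 0
--     k = len(set(bitstring[:3]))
--     return 0 if k == 1 else (2 if k == 2 else 3)
-- ===== Notes on version B (the rewrite author's own statement) =====
-- stated objective: simpler
-- what changed: Replaces the explicit edge list and pairwise-comparison loop with a closed form: count the distinct values among the first three characters and map 1->0, 2->2, 3->3.
import Mathlib
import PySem

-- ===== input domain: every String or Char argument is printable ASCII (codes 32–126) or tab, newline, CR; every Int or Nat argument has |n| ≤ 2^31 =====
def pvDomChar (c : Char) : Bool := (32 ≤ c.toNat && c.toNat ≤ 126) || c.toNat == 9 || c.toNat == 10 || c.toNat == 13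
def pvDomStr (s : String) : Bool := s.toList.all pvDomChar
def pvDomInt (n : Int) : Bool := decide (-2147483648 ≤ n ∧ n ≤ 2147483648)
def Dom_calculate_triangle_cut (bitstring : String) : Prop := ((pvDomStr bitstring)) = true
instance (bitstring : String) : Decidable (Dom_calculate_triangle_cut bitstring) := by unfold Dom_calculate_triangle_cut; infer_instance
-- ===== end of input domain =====

-- B replaces A's edge-list/pairwise-comparison loop with a closed form on the number of distinct values among the first three characters (objective: simpler).

-- ===== PORT A =====
-- A's code on the character list: guard, then loop over the literal edge list accumulating cut_value.
def pvA_chars (cs : List Char) : Int :=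
  if cs.length < 3 then 0
  else
    [((0 : Int), (1 : Int)), (1, 2), (2, 0)].foldl
      (fun acc p =>
        if p.1 < (cs.length : Int) ∧ p.2 < (cs.length : Int) then
          if PySem.List.pyGet? cs p.1 ≠ PySem.List.pyGet? cs p.2 then acc + 1 else acc
        else acc) 0


def calculate_triangle_cut (bitstring : String) : Int := pvA_chars bitstring.toList

-- ===== PORT B =====
-- B's code: k = len(set(bitstring[:3])); 0 if k == 1 else (2 if k == 2 else 3)
def pvB_chars (cs : List Char) : Int :=
  if cs.length < 3 then 0
  else
    let k := (PySem.Set.ofList (PySem.List.slice cs none (some 3))).length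
    if k == 1 then 0 else if k == 2 then 2 else 3


def calculate_triangle_cut_alt (bitstring : String) : Int := pvB_chars bitstring.toList

-- ===== PRECONDITION & SPEC =====
def Spec_calculate_triangle_cut (bitstring : String) (out : Int) : Prop := out = calculate_triangle_cut_alt bitstring
instance (bitstring : String) (out : Int) : Decidable (Spec_calculate_triangle_cut bitstring out) := by unfold Spec_calculate_triangle_cut; infer_instance

-- ===== CLAIM (what is proved, stated in full; the proofs are below) =====
def Claim_equal_calculate_triangle_cut : Prop := ∀ (bitstring : String), Dom_calculate_triangle_cut bitstring → Spec_calculate_triangle_cut bitstring (calculate_triangle_cut bitstring)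

-- ===== LEMMAS AND PROOFS =====

theorem pv_chars_eq (cs : List Char) : pvA_chars cs = pvB_chars cs := by
  match cs with
  | [] => rfl
  | [a] => rfl
  | [a, b] => rfl
  | a :: b :: c :: rest =>
    have h3 : ¬ (a :: b :: c :: rest).length < 3 := by simp
    have g0 : PySem.List.pyGet? (a :: b :: c :: rest) 0 = some a := PySem.List.pyGet?_zero_cons _ _
    have g1 : PySem.List.pyGet? (a :: b :: c :: rest) 1 = some b := by
      rw [show (1:Int)=((1:Nat):Int) from rfl, PySem.List.pyGet?_natCast]; rfl
    have g2 : PySem.List.pyGet? (a :: b :: c :: rest) 2 = some c := by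
      rw [show (2:Int)=((2:Nat):Int) from rfl, PySem.List.pyGet?_natCast]; rfl
    have hslice : PySem.List.slice (a :: b :: c :: rest) none (some 3) = [a, b, c] := by
      simp [PySem.List.slice_to]
    have hc : ∀ i j : Int, 0 ≤ i → i ≤ 2 → 0 ≤ j → j ≤ 2 →
        (i < ((a :: b :: c :: rest).length : Int) ∧ j < ((a :: b :: c :: rest).length : Int)) := by
      intro i j h1 h2 h4 h5
      constructor <;> (simp only [List.length_cons]; push_cast; omega)
    simp only [pvA_chars, pvB_chars, if_neg h3, List.foldl, hslice, g0, g1, g2,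
      if_pos (hc 0 1 (by norm_num) (by norm_num) (by norm_num) (by norm_num)),
      if_pos (hc 1 2 (by norm_num) (by norm_num) (by norm_num) (by norm_num)),
      if_pos (hc 2 0 (by norm_num) (by norm_num) (by norm_num) (by norm_num))]
    by_cases hab : a = b <;> by_cases hbc : b = c <;> by_cases hca : c = a <;>
      (try subst hab) <;> (try subst hbc) <;> (try subst hca) <;>
      simp_all [PySem.Set.ofList, PySem.Set.add, PySem.Set.contains, List.foldl, ne_comm] <;> (split_ifs <;> simp_all) <;> exact (‹c = a ∨ c = b›).elim (fun h => hca h.symm) (fun h => hbc h.symm)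

-- ===== VERDICT (by name: the statement is the Claim_ definition above) =====
theorem calculate_triangle_cut_spec : Claim_equal_calculate_triangle_cut := by
  intro s _
  unfold Spec_calculate_triangle_cut calculate_triangle_cut calculate_triangle_cut_alt
  exact pv_chars_eq s.toList
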